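-- pv_equiv track=rewrite | github.com/zoutei/TSST_Syndiff_Core | tools/ps1_mask_definitions.py | encode_ps1_mask
-- ===== SOURCE A (Python) =====
-- PS1_MASK_BITS = {
--     "DETECTOR": 1,  # Bit 0
--     "FLAT": 2,  # Bit 1
--     "DARK": 4,  # Bit 2
--     "BLANK": 8,  # Bit 3
--     "CTE": 16,  # Bit 4
--     "SAT": 32,  # Bit 5
--     "LOW": 64,  # Bit 6
--     "SUSPECT": 128,  # Bit 7
--     "BURNTOOL": 128,  # Bit 7
--     "CR": 256,  # Bit 8
--     "SPIKE": 512,  # Bit 9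
--     "GHOST": 1024,  # Bit 10
--     "STREAK": 2048,  # Bit 11
--     "STARCORE": 4096,  # Bit 12
--     "CONV.BAD": 8192,  # Bit 13
--     "CONV.POOR": 16384,  # Bit 14
-- }
--
-- PS1_SPECIAL_VALUES = {
--     "MASK.VALUE": 8575,  # Combined mask value
--     "MARK.VALUE": 32768,  # Mark value
-- }
--
-- def encode_ps1_mask(flags):
--     """Encode list of flags into PS1 mask value."""
--     mask_value = 0
--     for flag in flags:
--         if flag in PS1_MASK_BITS:
--             mask_value |= PS1_MASK_BITS[flag]
--         elif flag in PS1_SPECIAL_VALUES: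
--             return PS1_SPECIAL_VALUES[flag]
--     return mask_value
-- ===== SOURCE B (Python) =====
-- PS1_MASK_BITS = {
--     "DETECTOR": 1, "FLAT": 2, "DARK": 4, "BLANK": 8, "CTE": 16, "SAT": 32,
--     "LOW": 64, "SUSPECT": 128, "BURNTOOL": 128, "CR": 256, "SPIKE": 512,
--     "GHOST": 1024, "STREAK": 2048, "STARCORE": 4096, "CONV.BAD": 8192,
--     "CONV.POOR": 16384,
-- }
--
-- PS1_SPECIAL_VALUES = {
--     "MASK.VALUE": 8575,  # Combined mask value
--     "MARK.VALUE": 32768,  # Mark value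
-- }
--
-- def encode_ps1_mask(flags):
--     """Encode list of flags into PS1 mask value."""
--     flags = list(flags)
--     # Pass 1: the first special flag (in input order) short-circuits everything.
--     for flag in flags:
--         if flag in PS1_SPECIAL_VALUES:
--             return PS1_SPECIAL_VALUES[flag]
--     # Pass 2: iterate over the TABLE, not the input: OR in each bit whose
--     # flag name occurs anywhere in the input.  Correct because OR is
--     # associative, commutative and idempotent, so only the SET of
--     # recognised flag names matters, not their order or multiplicity.
--     mask = 0
--     for name, bit in PS1_MASK_BITS.items():
--         if name in flags:
--             mask |= bit
--     return mask
-- ===== Notes on version B (the rewrite author's own statement) =====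
-- stated objective: alternative
-- what changed: Replaces A's single flag-driven OR-accumulating loop with embedded early return by two staged passes: first scan for a special flag and return its value, otherwise iterate over the fixed bit TABLE and OR in each bit whose name occurs in the input (correct since OR is associative, commutative and idempotent).
import Mathlib
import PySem

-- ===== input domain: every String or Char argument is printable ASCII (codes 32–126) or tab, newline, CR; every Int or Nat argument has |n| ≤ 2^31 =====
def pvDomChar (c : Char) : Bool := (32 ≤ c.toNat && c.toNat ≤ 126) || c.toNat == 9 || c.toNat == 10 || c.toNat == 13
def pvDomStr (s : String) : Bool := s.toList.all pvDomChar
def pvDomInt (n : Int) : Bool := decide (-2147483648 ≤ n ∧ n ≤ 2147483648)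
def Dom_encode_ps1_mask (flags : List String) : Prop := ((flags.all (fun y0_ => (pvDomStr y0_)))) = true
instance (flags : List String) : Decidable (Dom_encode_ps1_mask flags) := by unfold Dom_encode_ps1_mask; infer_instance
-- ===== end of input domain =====

-- B replaces A's single flag-driven OR loop with early return by two staged passes
-- (find the first special flag, else OR over the fixed bit table by membership);
-- return values are equal everywhere (OR is associative, commutative, idempotent).

-- ===== PORT A =====
def PS1_MASK_BITS : PySem.Dict String Int := PySem.Dict.mk
  [("DETECTOR", 1), ("FLAT", 2), ("DARK", 4), ("BLANK", 8), ("CTE", 16), ("SAT", 32),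
   ("LOW", 64), ("SUSPECT", 128), ("BURNTOOL", 128), ("CR", 256), ("SPIKE", 512),
   ("GHOST", 1024), ("STREAK", 2048), ("STARCORE", 4096), ("CONV.BAD", 8192),
   ("CONV.POOR", 16384)]

def PS1_SPECIAL_VALUES : PySem.Dict String Int := PySem.Dict.mk
  [("MASK.VALUE", 8575), ("MARK.VALUE", 32768)]

-- the 'for flag in flags' loop with accumulator mask_value and the early return
def encodeA_loop : List String → Int → Int
  | [], mask_value => mask_value
  | flag :: rest, mask_value =>
    if PS1_MASK_BITS.contains flag then
      encodeA_loop rest (PySem.Int.bor mask_value (PS1_MASK_BITS.getD flag 0))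
    else if PS1_SPECIAL_VALUES.contains flag then
      PS1_SPECIAL_VALUES.getD flag 0
    else
      encodeA_loop rest mask_value

def encode_ps1_mask (flags : List String) : Int := encodeA_loop flags 0

-- ===== PORT B =====
-- pass 1: 'for flag in flags: if flag in PS1_SPECIAL_VALUES: return …'
def findSpecialB : List String → Option Int
  | [] => none
  | flag :: rest =>
    match PS1_SPECIAL_VALUES.get? flag with
    | some v => some v
    | none => findSpecialB rest

def encode_ps1_mask_alt (flags : List String) : Int :=
  match findSpecialB flags with
  | some v => v
  | none =>
    -- pass 2: 'for name, bit in PS1_MASK_BITS.items(): if name in flags: mask |= bit'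
    PS1_MASK_BITS.items.foldl
      (fun mask nb => if flags.contains nb.1 then PySem.Int.bor mask nb.2 else mask) 0

-- ===== PRECONDITION & SPEC =====
def Spec_encode_ps1_mask (flags : List String) (out : Int) : Prop := out = encode_ps1_mask_alt flags
instance (flags : List String) (out : Int) : Decidable (Spec_encode_ps1_mask flags out) := by unfold Spec_encode_ps1_mask; infer_instance

-- ===== CLAIM (what is proved, stated in full; the proofs are below) =====
def Claim_equal_encode_ps1_mask : Prop := ∀ (flags : List String), Dom_encode_ps1_mask flags → Spec_encode_ps1_mask flags (encode_ps1_mask flags)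

-- ===== LEMMAS AND PROOFS =====

-- OR algebra on nonnegative integers (all values here are nonnegative)
theorem natLor_self (a : Nat) : a ||| a = a :=
  Nat.eq_of_testBit_eq fun i => by simp

theorem bor_nonneg {a b : Int} (ha : 0 ≤ a) (hb : 0 ≤ b) : 0 ≤ PySem.Int.bor a b := by
  rw [PySem.Int.bor_of_nonneg ha hb]; exact Int.natCast_nonneg _

theorem bor_self {a : Int} (ha : 0 ≤ a) : PySem.Int.bor a a = a := by
  rw [PySem.Int.bor_of_nonneg ha ha, natLor_self, Int.toNat_of_nonneg ha]

theorem bor_assoc {a b c : Int} (ha : 0 ≤ a) (hb : 0 ≤ b) (hc : 0 ≤ c) :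
    PySem.Int.bor (PySem.Int.bor a b) c = PySem.Int.bor a (PySem.Int.bor b c) := by
  rw [PySem.Int.bor_of_nonneg ha hb, PySem.Int.bor_of_nonneg hb hc,
      PySem.Int.bor_of_nonneg (Int.natCast_nonneg _) hc,
      PySem.Int.bor_of_nonneg ha (Int.natCast_nonneg _)]
  simp [Nat.lor_assoc]

-- OR of a list of nonnegative integers
def orL (l : List Int) : Int := l.foldl PySem.Int.bor 0

theorem foldl_bor_nonneg (l : List Int) :
    (∀ x ∈ l, 0 ≤ x) → ∀ m : Int, 0 ≤ m → 0 ≤ l.foldl PySem.Int.bor m := by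
  induction l with
  | nil => intro _ m hm; exact hm
  | cons x xs ih =>
    intro h m hm
    exact ih (fun y hy => h y (List.mem_cons_of_mem _ hy)) _
      (bor_nonneg hm (h x List.mem_cons_self))

theorem orL_nonneg {l : List Int} (h : ∀ x ∈ l, 0 ≤ x) : 0 ≤ orL l :=
  foldl_bor_nonneg l h 0 le_rfl

theorem foldl_bor_eq {l : List Int} (h : ∀ x ∈ l, 0 ≤ x) (m : Int) (hm : 0 ≤ m) :
    l.foldl PySem.Int.bor m = PySem.Int.bor m (orL l) := by
  induction l generalizing m with
  | nil => simp [orL, List.foldl, PySem.Int.bor_zero]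
  | cons x xs ih =>
    have hx : 0 ≤ x := h x List.mem_cons_self
    have hxs : ∀ y ∈ xs, 0 ≤ y := fun y hy => h y (List.mem_cons_of_mem _ hy)
    have hox : 0 ≤ orL xs := orL_nonneg hxs
    simp only [orL, List.foldl]
    rw [ih hxs _ (bor_nonneg hm hx), ih hxs _ (bor_nonneg (by decide) hx),
        bor_assoc hm hx hox]
    congr 1
    rw [PySem.Int.bor_comm (0 : Int) x, PySem.Int.bor_zero]

theorem orL_cons {x : Int} {xs : List Int} (hx : 0 ≤ x) (hxs : ∀ y ∈ xs, 0 ≤ y) :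
    orL (x :: xs) = PySem.Int.bor x (orL xs) := by
  show (x :: xs).foldl PySem.Int.bor 0 = _
  simp only [List.foldl]
  rw [foldl_bor_eq hxs _ (bor_nonneg (by decide) hx)]
  congr 1
  rw [PySem.Int.bor_comm (0 : Int) x, PySem.Int.bor_zero]

theorem bor_absorb {b : Int} {l : List Int} (h : ∀ x ∈ l, 0 ≤ x) (hb : b ∈ l) :
    PySem.Int.bor b (orL l) = orL l := by
  induction l with
  | nil => cases hb
  | cons x xs ih =>
    have hx : 0 ≤ x := h x List.mem_cons_self
    have hxs : ∀ y ∈ xs, 0 ≤ y := fun y hy => h y (List.mem_cons_of_mem _ hy)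
    have hox : 0 ≤ orL xs := orL_nonneg hxs
    rw [orL_cons hx hxs]
    rcases List.mem_cons.mp hb with rfl | hbx
    · rw [← bor_assoc hx hx hox, bor_self hx]
    · have hb0 : 0 ≤ b := hxs b hbx
      rw [PySem.Int.bor_comm x (orL xs), ← bor_assoc hb0 hox hx, ih hxs hbx,
          PySem.Int.bor_comm (orL xs) x]

theorem orL_subset_bor {l m : List Int} (hm : ∀ x ∈ m, 0 ≤ x) (hsub : ∀ x ∈ l, x ∈ m) :
    PySem.Int.bor (orL l) (orL m) = orL m := by
  induction l with
  | nil => rw [show orL [] = 0 from rfl, PySem.Int.bor_comm, PySem.Int.bor_zero]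
  | cons x xs ih =>
    have hx : 0 ≤ x := hm x (hsub x List.mem_cons_self)
    have hxs : ∀ y ∈ xs, 0 ≤ y := fun y hy => hm y (hsub y (List.mem_cons_of_mem _ hy))
    rw [orL_cons hx hxs, bor_assoc hx (orL_nonneg hxs) (orL_nonneg hm),
        ih (fun y hy => hsub y (List.mem_cons_of_mem _ hy)),
        bor_absorb hm (hsub x List.mem_cons_self)]

theorem orL_eq_of_mem_iff {l m : List Int} (hm : ∀ x ∈ m, 0 ≤ x)
    (h : ∀ x, x ∈ l ↔ x ∈ m) : orL l = orL m := by
  have hl : ∀ x ∈ l, 0 ≤ x := fun x hx => hm x ((h x).mp hx)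
  have h1 := orL_subset_bor hm (fun x hx => (h x).mp hx)
  have h2 := orL_subset_bor hl (fun x hx => (h x).mpr hx)
  rw [PySem.Int.bor_comm] at h2
  rw [← h1, h2]

-- facts about the literal dictionaries
theorem bits_nodup_keys : PS1_MASK_BITS.keys.Nodup := by decide

theorem special_of_bits (f : String) (h : PS1_MASK_BITS.contains f = true) :
    PS1_SPECIAL_VALUES.contains f = false := by
  simp [PS1_MASK_BITS, PS1_SPECIAL_VALUES, PySem.Dict.contains_mk] at h ⊢
  rcases h with h|h|h|h|h|h|h|h|h|h|h|h|h|h|h|h <;> subst h <;> decide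

theorem get?_of_contains (f : String) (h : PS1_MASK_BITS.contains f = true) :
    PS1_MASK_BITS.get? f = some (PS1_MASK_BITS.getD f 0) := by
  rw [PySem.Dict.contains_eq_isSome_get?] at h
  cases hg : PS1_MASK_BITS.get? f with
  | none => rw [hg] at h; simp at h
  | some v => simp [PySem.Dict.getD_eq_get?_getD, hg]

theorem get?_of_not_contains (f : String) (h : PS1_MASK_BITS.contains f = false) :
    PS1_MASK_BITS.get? f = none := by
  rw [PySem.Dict.contains_eq_isSome_get?] at h
  cases hg : PS1_MASK_BITS.get? f with
  | none => rfl
  | some v => rw [hg] at h; simp at h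

theorem items_val_nonneg : ∀ p ∈ PS1_MASK_BITS.items, 0 ≤ p.2 := by decide

theorem special_get?_of_contains (f : String) (h : PS1_SPECIAL_VALUES.contains f = true) :
    PS1_SPECIAL_VALUES.get? f = some (PS1_SPECIAL_VALUES.getD f 0) := by
  rw [PySem.Dict.contains_eq_isSome_get?] at h
  cases hg : PS1_SPECIAL_VALUES.get? f with
  | none => rw [hg] at h; simp at h
  | some v => simp [PySem.Dict.getD_eq_get?_getD, hg]

theorem special_get?_of_not_contains (f : String) (h : PS1_SPECIAL_VALUES.contains f = false) :
    PS1_SPECIAL_VALUES.get? f = none := by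
  rw [PySem.Dict.contains_eq_isSome_get?] at h
  cases hg : PS1_SPECIAL_VALUES.get? f with
  | none => rfl
  | some v => rw [hg] at h; simp at h

-- B's pass 1 is the find?-characterisation of A's early return
theorem findSpecialB_eq (flags : List String) :
    findSpecialB flags =
      (flags.find? (fun f => PS1_SPECIAL_VALUES.contains f)).map
        (fun f => PS1_SPECIAL_VALUES.getD f 0) := by
  induction flags with
  | nil => rfl
  | cons flag rest ih =>
    by_cases hs : PS1_SPECIAL_VALUES.contains flag = true
    · simp [findSpecialB, special_get?_of_contains flag hs, hs]
    · simp only [Bool.not_eq_true] at hs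
      simp [findSpecialB, special_get?_of_not_contains flag hs, hs, ih]

-- the two bit-collecting lists
def bitsOfFlags (flags : List String) : List Int :=
  flags.filterMap (fun f => PS1_MASK_BITS.get? f)

def bitsOfTable (flags : List String) : List Int :=
  PS1_MASK_BITS.items.filterMap
    (fun nb => if flags.contains nb.1 then some nb.2 else none)

theorem mem_bitsOfFlags_iff {flags : List String} {b : Int} :
    b ∈ bitsOfFlags flags ↔ ∃ f ∈ flags, PS1_MASK_BITS.get? f = some b := by
  simp [bitsOfFlags, List.mem_filterMap]

theorem mem_bitsOfTable_iff {flags : List String} {b : Int} :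
    b ∈ bitsOfTable flags ↔
      ∃ p ∈ PS1_MASK_BITS.items, p.1 ∈ flags ∧ p.2 = b := by
  simp only [bitsOfTable, List.mem_filterMap]
  constructor
  · rintro ⟨p, hp, hcond⟩
    split at hcond
    · exact ⟨p, hp, List.contains_iff_mem.mp (by assumption), Option.some.inj hcond⟩
    · cases hcond
  · rintro ⟨p, hp, hmem, rfl⟩
    exact ⟨p, hp, by rw [if_pos (List.contains_iff_mem.mpr hmem)]⟩

theorem bits_lists_same_mem (flags : List String) (b : Int) :
    b ∈ bitsOfFlags flags ↔ b ∈ bitsOfTable flags := by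
  rw [mem_bitsOfFlags_iff, mem_bitsOfTable_iff]
  constructor
  · rintro ⟨f, hf, hget⟩
    exact ⟨(f, b), PySem.Dict.mem_items_of_get?_eq_some PS1_MASK_BITS hget, hf, rfl⟩
  · rintro ⟨⟨n, v⟩, hp, hmem, rfl⟩
    exact ⟨n, hmem, PySem.Dict.get?_of_mem_items PS1_MASK_BITS hp bits_nodup_keys⟩

theorem bitsOfTable_nonneg (flags : List String) : ∀ x ∈ bitsOfTable flags, 0 ≤ x := by
  intro x hx
  rcases (mem_bitsOfTable_iff).mp hx with ⟨p, hp, _, rfl⟩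
  exact items_val_nonneg p hp

-- A's whole loop, characterised as pass-1-then-pass-2 on the FLAG list
theorem encodeA_loop_eq (flags : List String) (m : Int) :
    encodeA_loop flags m =
      match flags.find? (fun f => PS1_SPECIAL_VALUES.contains f) with
      | some f => PS1_SPECIAL_VALUES.getD f 0
      | none => (bitsOfFlags flags).foldl PySem.Int.bor m := by
  induction flags generalizing m with
  | nil => rfl
  | cons flag rest ih =>
    by_cases hb : PS1_MASK_BITS.contains flag = true
    · have hs := special_of_bits flag hb
      simp only [encodeA_loop, hb, if_pos, List.find?_cons, hs, Bool.false_eq_true,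
        bitsOfFlags, List.filterMap_cons, get?_of_contains flag hb, List.foldl_cons]
      exact ih (PySem.Int.bor m (PS1_MASK_BITS.getD flag 0))
    · simp only [Bool.not_eq_true] at hb
      by_cases hs : PS1_SPECIAL_VALUES.contains flag = true
      · simp [encodeA_loop, hb, hs]
      · simp only [Bool.not_eq_true] at hs
        simp only [encodeA_loop, hb, Bool.false_eq_true, hs, List.find?_cons,
          bitsOfFlags, List.filterMap_cons, get?_of_not_contains flag hb]
        exact ih m

-- B's pass 2 is the fold of bitsOfTable
theorem passB_eq (flags : List String) :
    PS1_MASK_BITS.items.foldl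
      (fun mask nb => if flags.contains nb.1 then PySem.Int.bor mask nb.2 else mask) 0 =
      orL (bitsOfTable flags) := by
  show _ = (PS1_MASK_BITS.items.filterMap _).foldl PySem.Int.bor 0
  rw [List.foldl_filterMap]
  congr 1
  funext m p
  by_cases hm : p.1 ∈ flags <;> simp [hm]

-- ===== VERDICT (by name: the statement is the Claim_ definition above) =====
theorem encode_ps1_mask_spec : Claim_equal_encode_ps1_mask := by
  intro flags _
  unfold Spec_encode_ps1_mask encode_ps1_mask encode_ps1_mask_alt
  rw [encodeA_loop_eq flags 0, findSpecialB_eq]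
  cases hf : flags.find? (fun f => PS1_SPECIAL_VALUES.contains f) with
  | some f => rfl
  | none =>
    simp only [Option.map_none]
    rw [passB_eq]
    exact orL_eq_of_mem_iff (bitsOfTable_nonneg flags) (bits_lists_same_mem flags)
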